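-- pv_equiv track=rewrite | github.com/RohdeK/adventofcode | puzzles/day_06/solution_part_1.py | decolumnize
-- ===== SOURCE A (Python) =====
-- from collections import defaultdict
--
-- def decolumnize(input_lines: str) -> list[tuple[list[int], str]]:
--     actual_lines = input_lines.split("\n")
--     actual_lines = [line for line in actual_lines if line]
--     max_line = max(len(line) for line in actual_lines)
--     actual_lines = [line.ljust(max_line + 1, " ") for line in actual_lines]
--
--     out_vals = []
--
--     iter_vals: dict[int, str] = defaultdict(str)
--     iter_op = ""
--
--     for hor_index in range(max_line + 1):
--         if all(line[hor_index] == " " for line in actual_lines):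
--             act_vals = [int(val) for key, val in sorted(iter_vals.items())]
--             out_vals.append((act_vals, iter_op))
--             iter_vals.clear()
--             iter_op = ""
--
--         else:
--             for idx, line in enumerate(actual_lines[:-1]):
--                 if line[hor_index] != " ":
--                     iter_vals[idx] += line[hor_index]
--
--             if actual_lines[-1][hor_index] != " ":
--                 iter_op += actual_lines[-1][hor_index]
--
--     return out_vals
-- ===== SOURCE B (Python) =====
-- def decolumnize(input_lines: str) -> list[tuple[list[int], str]]:
--     lines = [line for line in input_lines.split("\n") if line]
--     width = max(len(line) for line in lines)
--     lines = [line.ljust(width + 1, " ") for line in lines]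
--     is_space = [all(line[j] == " " for line in lines) for j in range(width + 1)]
--     out = []
--     last = -1
--     for j in range(width + 1):
--         if is_space[j]:
--             cells = [line[last + 1:j].replace(" ", "") for line in lines[:-1]]
--             out.append(([int(c) for c in cells if c],
--                         lines[-1][last + 1:j].replace(" ", "")))
--             last = j
--     return out
-- ===== Notes on version B (the rewrite author's own statement) =====
-- stated objective: alternative
-- what changed: A scans every column accumulating per-row character strings in a defaultdict that is sorted and flushed at each all-space column; B precomputes which columns are all-space and, per separator column, slices each row between the previous separator and the current one, so the per-character dict bookkeeping and the sort disappear.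
-- outside the precondition, e.g. on decolumnize('-5\n+'): A returns [([-5], '+')], B returns [([-5], '+')]
import Mathlib
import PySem

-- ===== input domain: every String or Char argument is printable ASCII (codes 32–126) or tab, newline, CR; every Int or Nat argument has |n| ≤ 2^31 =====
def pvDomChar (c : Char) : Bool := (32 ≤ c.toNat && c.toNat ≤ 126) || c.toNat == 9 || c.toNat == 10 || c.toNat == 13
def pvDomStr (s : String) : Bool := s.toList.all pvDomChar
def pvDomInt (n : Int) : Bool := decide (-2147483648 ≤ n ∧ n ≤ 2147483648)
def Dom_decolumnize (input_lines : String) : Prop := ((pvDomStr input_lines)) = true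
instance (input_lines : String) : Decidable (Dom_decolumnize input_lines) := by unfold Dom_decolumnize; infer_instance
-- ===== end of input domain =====

-- B replaces A's per-character defaultdict accumulation (flushed and sorted at every all-space
-- column) by precomputed all-space columns and per-separator row slices; same cost, no dict, no sort.

-- ===== PORT A =====
-- str.ljust(w, fill) on char lists (exact: unchanged when w ≤ len)
def pyLjust (l : List Char) (w : Nat) (fill : Char) : List Char :=
  l ++ List.replicate (w - l.length) fill

-- Python's enumerate(xs): (index, element) pairs, index as Python int
def pyEnumerate {α : Type} (xs : List α) : List (Int × α) :=
  xs.zipIdx.map (fun p => ((p.2 : Int), p.1))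

-- body of A's `for hor_index in range(...)` loop; state = (out_vals, iter_vals, iter_op)
def pvStepA (lines : List (List Char))
    (st : List (List Int × String) × PySem.Dict Int (List Char) × List Char) (hor : Int) :
    List (List Int × String) × PySem.Dict Int (List Char) × List Char :=
  if lines.all (fun line => decide (PySem.List.pyGet? line hor = some ' ')) then
    -- sorted(iter_vals.items()): Python compares the (key, value) pairs; the keys are distinct,
    -- so this is exactly a (stable) sort by key
    (st.1 ++ [((PySem.List.sorted st.2.1.items (fun p => p.1)).map
                 -- int(val); on a non-int string Python raises ValueError (excluded by Pre_)
                 (fun p => (PySem.Int.ofChars? p.2).getD 0),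
               String.mk st.2.2)],
     PySem.Dict.empty, [])
  else
    (st.1,
     (pyEnumerate (PySem.List.slice lines none (some (-1)))).foldl
       (fun d p =>
         match PySem.List.pyGet? p.2 hor with          -- line[hor_index] (always in range here)
         | some c => if c ≠ ' ' then d.insert p.1 (d.getD p.1 [] ++ [c]) else d
         | none => d) st.2.1,
     match PySem.List.pyGet? ((PySem.List.pyGet? lines (-1)).getD []) hor with  -- actual_lines[-1][hor_index]
     | some c => if c ≠ ' ' then st.2.2 ++ [c] else st.2.2
     | none => st.2.2)

def decolumnize (input_lines : String) : List (List Int × String) :=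
  let ls := (PySem.Chars.splitOn input_lines.toList ['\n']).filter (fun l => !l.isEmpty)
  -- max(len(line) ...): Python raises ValueError on an empty sequence (excluded by Pre_)
  match PySem.List.max? (ls.map List.length) id with
  | none => []
  | some max_line =>
    let lines := ls.map (fun l => pyLjust l (max_line + 1) ' ')
    ((PySem.List.pyRange 0 ((max_line : Int) + 1)).foldl (pvStepA lines)
      ([], PySem.Dict.empty, [])).1

-- ===== PORT B =====
-- body of B's loop; state = (out, last)
def pvStepB (lines : List (List Char)) (is_space : List Bool)
    (st : List (List Int × String) × Int) (j : Nat) : List (List Int × String) × Int :=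
  if is_space.getD j false then
    let cells := lines.dropLast.map (fun line =>
      PySem.Chars.replace (PySem.List.slice line (some (st.2 + 1)) (some (j : Int))) [' '] [])
    (st.1 ++ [((cells.filter (fun c => !c.isEmpty)).map (fun c => (PySem.Int.ofChars? c).getD 0),
               String.mk (PySem.Chars.replace
                 (PySem.List.slice (lines.getLastD []) (some (st.2 + 1)) (some (j : Int))) [' '] []))],
     (j : Int))
  else st

def decolumnize_alt (input_lines : String) : List (List Int × String) :=
  let ls := (PySem.Chars.splitOn input_lines.toList ['\n']).filter (fun l => !l.isEmpty)
  -- max() raises on the empty sequence in Source B too (excluded by Pre_)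
  match PySem.List.max? (ls.map List.length) id with
  | none => []
  | some width =>
    let lines := ls.map (fun l => pyLjust l (width + 1) ' ')
    let is_space := (List.range (width + 1)).map
      (fun (j : Nat) => lines.all (fun line => decide (PySem.List.pyGet? line (j : Int) = some ' ')))
    ((List.range (width + 1)).foldl (pvStepB lines is_space) ([], -1)).1

-- ===== PRECONDITION & SPEC =====
-- Pre_ excludes inputs with no non-empty line (max() raises ValueError) and inputs in which a
-- non-last non-empty line contains a character other than a decimal digit or a space — a simple
-- closed-form guarantee that every int() call in A succeeds; it is conservative: A also happens to
-- return on some inputs with signs or underscores that parse (B agrees with A there as well).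
def Pre_decolumnize (input_lines : String) : Prop :=
  let ls := (PySem.Chars.splitOn input_lines.toList ['\n']).filter (fun l => !l.isEmpty)
  ls ≠ [] ∧ (ls.dropLast.all
    (fun l => l.all (fun c => (48 ≤ c.toNat && c.toNat ≤ 57) || c.toNat == 32)) = true)
instance (input_lines : String) : Decidable (Pre_decolumnize input_lines) := by
  unfold Pre_decolumnize; infer_instance

def pvWitness_decolumnize : String := "1\n2"

def Spec_decolumnize (input_lines : String) (out : List (List Int × String)) : Prop :=
  out = decolumnize_alt input_lines
instance (input_lines : String) (out : List (List Int × String)) : Decidable (Spec_decolumnize input_lines out) := by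
  unfold Spec_decolumnize; infer_instance

-- ===== CLAIM (what is proved, stated in full; the proofs are below) =====
def Claim_equal_decolumnize : Prop := ∀ (input_lines : String), Dom_decolumnize input_lines → Pre_decolumnize input_lines → Spec_decolumnize input_lines (decolumnize input_lines)

-- ===== LEMMAS AND PROOFS =====

-- the characters of row l in columns [a, j), spaces removed
def pvCell (l : List Char) (a j : Nat) : List Char :=
  ((l.drop a).take (j - a)).filter (fun c => c != ' ')

-- invariant carried by A's dict while scanning columns [0, j), a = current group start
def pvInvD (R : List (List Char)) (d : PySem.Dict Int (List Char)) (a j : Nat) : Prop :=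
  (∀ i : Nat, d.get? (i : Int) =
      if i < R.length then
        (if pvCell (R.getD i []) a j = [] then none else some (pvCell (R.getD i []) a j))
      else none)
  ∧ (∀ v : Int, v < 0 → d.get? v = none)
  ∧ d.keys.Nodup

-- relation between A's and B's loop states
def pvRel (L : List (List Char))
    (stA : List (List Int × String) × PySem.Dict Int (List Char) × List Char)
    (stB : List (List Int × String) × Int) (a j : Nat) : Prop :=
  stA.1 = stB.1 ∧ stB.2 = (a : Int) - 1 ∧ pvInvD L.dropLast stA.2.1 a j
  ∧ stA.2.2 = pvCell (L.getLastD []) a j ∧ a ≤ j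

lemma pvReplaceGo (fuel : Nat) : ∀ (l acc : List Char), l.length ≤ fuel →
    PySem.Chars.replace.go [' '] [] fuel l acc = acc.reverse ++ l.filter (fun c => c != ' ') := by
  induction fuel with
  | zero =>
    intro l acc h
    have hl : l = [] := List.eq_nil_of_length_eq_zero (Nat.le_zero.mp h)
    subst hl
    rw [PySem.Chars.replace.go.eq_def]
    simp
  | succ fuel ih =>
    intro l acc h
    cases l with
    | nil =>
      rw [PySem.Chars.replace.go.eq_def]
      simp
    | cons c t =>
      rw [PySem.Chars.replace.go.eq_def]
      by_cases hc : c = ' '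
      · subst hc
        have hpre : [' '].isPrefixOf (' ' :: t) = true := by simp [List.isPrefixOf]
        simp only [hpre, if_true]
        have ht : t.length ≤ fuel := by simp at h; omega
        have := ih (List.drop [' '].length (' ' :: t)) ([].reverse ++ acc) (by simpa using ht)
        rw [this]
        simp
      · have hpre : [' '].isPrefixOf (c :: t) = false := by
          simp [List.isPrefixOf]
          exact fun he => hc he.symm
        simp only [hpre, Bool.false_eq_true, if_false]
        have ht : t.length ≤ fuel := by simp at h; omega
        rw [ih t (c :: acc) ht]
        simp [hc]

lemma pvReplace_space (cs : List Char) :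
    PySem.Chars.replace cs [' '] [] = cs.filter (fun c => c != ' ') := by
  have h := pvReplaceGo cs.length cs [] le_rfl
  simpa [PySem.Chars.replace] using h

lemma pvSlice_dropLast {α : Type} (l : List α) :
    PySem.List.slice l none (some (-1)) = l.dropLast := by
  simp [PySem.List.slice, PySem.List.clampIdx, List.dropLast_eq_take]
  rcases eq_or_ne l [] with h | h
  · simp [h]
  · rw [if_neg h]
    have hl : l.length ≠ 0 := fun he => h (List.eq_nil_of_length_eq_zero he)
    have h1 : ((l.length : Int) + -1).toNat = l.length - 1 := by omega
    rw [h1]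
    exact Nat.min_eq_left (by omega)

lemma pvGet_last {α : Type} (l : List α) (d : α) (h : l ≠ []) :
    (PySem.List.pyGet? l (-1)).getD d = l.getLastD d := by
  have h1 : l.length ≠ 0 := fun he => h (List.eq_nil_of_length_eq_zero he)
  have h2 : PySem.List.pyIdx? l.length (-1) = some (l.length - 1) := by
    simp only [PySem.List.pyIdx?]
    rw [if_neg (by omega), if_pos (by omega)]
    norm_num
  have h3 : PySem.List.pyGet? l (-1) = l[l.length - 1]? := by
    rw [PySem.List.pyGet?, h2]
    rfl
  rw [h3, List.getLastD_eq_getLast?, List.getLast?_eq_getElem?]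

lemma pvCell_slice (l : List Char) (a j : Nat) :
    PySem.Chars.replace (PySem.List.slice l (some ((a : Int))) (some (j : Int))) [' '] []
      = pvCell l a j := by
  rw [PySem.List.slice_natCast, pvReplace_space]; rfl

lemma pvCell_extend (l : List Char) (a j : Nat) (haj : a ≤ j) (hj : j < l.length) :
    pvCell l a (j + 1) = pvCell l a j ++ (if l.getD j ' ' ≠ ' ' then [l.getD j ' '] else []) := by
  unfold pvCell
  have h1 : j + 1 - a = (j - a) + 1 := by omega
  have h2 : a + (j - a) = j := by omega
  rw [h1, List.take_add_one, List.getElem?_drop, h2, List.getElem?_eq_getElem hj]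
  rw [List.getD_eq_getElem l ' ' hj]
  simp only [Option.toList_some, List.filter_append]
  by_cases hc : l[j] = ' '
  · simp [hc]
  · simp [hc]

lemma pvCell_empty (l : List Char) (a : Nat) : pvCell l a a = [] := by
  simp [pvCell]

lemma pvGetLastD_mem {α : Type} (L : List α) (d : α) (h : L ≠ []) : L.getLastD d ∈ L := by
  induction L with
  | nil => exact absurd rfl h
  | cons x t ih =>
    cases t with
    | nil => simp
    | cons y u => simpa using Or.inr (ih (by simp))

lemma pvFind_nodup {V : Type} :
    ∀ (l : List (Int × V)), (l.map Prod.fst).Nodup → ∀ (k : Int) (v : V),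
      ((k, v) ∈ l ↔ l.find? (fun p => p.1 == k) = some (k, v)) := by
  intro l
  induction l with
  | nil => intro _ k v; simp
  | cons p t ih =>
    intro hn k v
    obtain ⟨p1, p2⟩ := p
    simp only [List.map_cons, List.nodup_cons] at hn
    by_cases hp : p1 = k
    · subst hp
      rw [List.find?_cons_of_pos (by simp)]
      constructor
      · intro h
        rcases List.mem_cons.mp h with h | h
        · rw [← h]
        · exact absurd (List.mem_map_of_mem h) hn.1
      · intro h
        injection h with h
        exact List.mem_cons.mpr (Or.inl h.symm)
    · rw [List.find?_cons_of_neg (by simp [hp])]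
      rw [← ih hn.2 k v]
      constructor
      · intro h
        rcases List.mem_cons.mp h with h | h
        · exact absurd (congrArg Prod.fst h).symm hp
        · exact h
      · exact fun h => List.mem_cons.mpr (Or.inr h)

lemma pvMem_items {V : Type} (d : PySem.Dict Int V) (hn : d.keys.Nodup) (p : Int × V) :
    p ∈ d.items ↔ d.get? p.1 = some p.2 := by
  obtain ⟨k, v⟩ := p
  have hn' : (d.items.map Prod.fst).Nodup := hn
  rw [pvFind_nodup d.items hn' k v]
  unfold PySem.Dict.get?
  constructor
  · intro h
    rw [h]
    rfl
  · intro h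
    rcases hfind : d.items.find? (fun p => p.1 == k) with _ | q
    · rw [hfind] at h
      exact absurd h (by simp)
    · rw [hfind] at h
      obtain ⟨q1, q2⟩ := q
      have hq1 : q1 = k := by simpa using List.find?_some hfind
      simp only [Option.map_some, Option.some.injEq] at h
      rw [hfind, hq1, h]

lemma pvSorted_items (d : PySem.Dict Int (List Char)) (R : List (List Char)) (a j : Nat)
    (hInv : pvInvD R d a j) :
    PySem.List.sorted d.items (fun p => p.1)
      = (List.range R.length).filterMap (fun i =>
          if pvCell (R.getD i []) a j = [] then none
          else some ((i : Int), pvCell (R.getD i []) a j)) := by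
  obtain ⟨h1, h2, h3⟩ := hInv
  have hkey : ∀ (i : Nat) (b : Int × List Char),
      (if pvCell (R.getD i []) a j = [] then none
       else some ((i : Int), pvCell (R.getD i []) a j)) = some b → b.1 = (i : Int) := by
    intro i b hb
    by_cases hc : pvCell (R.getD i []) a j = []
    · rw [if_pos hc] at hb; exact absurd hb (by simp)
    · rw [if_neg hc] at hb
      injection hb with hb
      rw [← hb]
  have hpw : List.Pairwise (fun x y : Int × List Char => x.1 < y.1)
      ((List.range R.length).filterMap (fun i =>
        if pvCell (R.getD i []) a j = [] then none
        else some ((i : Int), pvCell (R.getD i []) a j))) := by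
    rw [List.pairwise_filterMap]
    refine List.Pairwise.imp ?_ List.pairwise_lt_range
    intro i i' hlt b hb b' hb'
    rw [hkey i b hb, hkey i' b' hb']
    exact_mod_cast hlt
  apply PySem.List.sorted_eq_of_perm_of_pairwise_lt
  · have htnd : ((List.range R.length).filterMap (fun i =>
        if pvCell (R.getD i []) a j = [] then none
        else some ((i : Int), pvCell (R.getD i []) a j))).Nodup :=
      List.Pairwise.imp (fun h he => absurd (he ▸ h) (lt_irrefl _)) hpw
    have hn' : (d.items.map Prod.fst).Nodup := h3
    have hind : d.items.Nodup := hn'.of_map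
    rw [List.perm_ext_iff_of_nodup htnd hind]
    intro p
    rw [List.mem_filterMap, pvMem_items d h3 p]
    constructor
    · rintro ⟨i, hi, hif⟩
      by_cases hc : pvCell (R.getD i []) a j = []
      · rw [if_pos hc] at hif; exact absurd hif (by simp)
      · rw [if_neg hc] at hif
        obtain rfl := Option.some.inj hif
        dsimp only
        rw [h1 i, if_pos (List.mem_range.mp hi), if_neg hc]
    · intro hget
      have hp0 : 0 ≤ p.1 := by
        by_contra hneg
        rw [h2 p.1 (by omega)] at hget
        exact absurd hget (by simp)
      have hpi : p.1 = ((p.1.toNat : Nat) : Int) := (Int.toNat_of_nonneg hp0).symm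
      rw [hpi, h1 p.1.toNat] at hget
      by_cases hlen : p.1.toNat < R.length
      · rw [if_pos hlen] at hget
        by_cases hc : pvCell (R.getD p.1.toNat []) a j = []
        · rw [if_pos hc] at hget; exact absurd hget (by simp)
        · rw [if_neg hc] at hget
          injection hget with hget
          refine ⟨p.1.toNat, List.mem_range.mpr hlen, ?_⟩
          rw [if_neg hc]
          exact congrArg some (Prod.ext hpi.symm hget)
      · rw [if_neg hlen] at hget
        exact absurd hget (by simp)
  · exact hpw

lemma pvRangeFilterMap {T : Type} (h : List Char → Option T) :
    ∀ (R : List (List Char)),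
      (List.range R.length).filterMap (fun i => h (R.getD i [])) = R.filterMap h := by
  intro R
  induction R with
  | nil => simp
  | cons r R ih =>
    rw [List.length_cons, List.range_succ_eq_map, List.filterMap_cons, List.filterMap_map]
    have he : ((fun i => h ((r :: R).getD i [])) ∘ Nat.succ) = fun i => h (R.getD i []) := by
      funext i; rfl
    rw [he, ih]
    rfl

lemma pvFilterMap_filter {α β : Type} (f : α → List Char) (g : α → β) :
    ∀ (R : List α),
      R.filterMap (fun x => if f x = [] then none else some (g x))
        = ((R.filter (fun x => !(f x).isEmpty)).map g) := by
  intro R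
  induction R with
  | nil => simp
  | cons r R ih =>
    rw [List.filterMap_cons, List.filter_cons]
    by_cases hc : f r = [] <;> simp [hc, ih]

lemma pvEmitVals (d : PySem.Dict Int (List Char)) (R : List (List Char)) (a j : Nat)
    (hInv : pvInvD R d a j) :
    (PySem.List.sorted d.items (fun p => p.1)).map (fun p => (PySem.Int.ofChars? p.2).getD 0)
      = ((R.map (fun l => pvCell l a j)).filter (fun c => !c.isEmpty)).map
          (fun c => (PySem.Int.ofChars? c).getD 0) := by
  rw [pvSorted_items d R a j hInv, List.map_filterMap]
  have he : (fun i => ((if pvCell (R.getD i []) a j = [] then none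
        else some ((i : Int), pvCell (R.getD i []) a j)).map
          (fun p => (PySem.Int.ofChars? p.2).getD 0)))
      = fun i => (if pvCell (R.getD i []) a j = [] then none
        else some ((PySem.Int.ofChars? (pvCell (R.getD i []) a j)).getD 0)) := by
    funext i
    by_cases hc : pvCell (R.getD i []) a j = []
    · rw [if_pos hc, if_pos hc]; rfl
    · rw [if_neg hc, if_neg hc]; rfl
  rw [he, pvRangeFilterMap (fun l => if pvCell l a j = [] then none
        else some ((PySem.Int.ofChars? (pvCell l a j)).getD 0)) R]
  rw [List.filter_map, List.map_map]
  exact pvFilterMap_filter (fun l => pvCell l a j)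
    (fun l => (PySem.Int.ofChars? (pvCell l a j)).getD 0) R

lemma pvInnerFold (hor : Int) (rows : List (List Char)) :
    ∀ (k : Nat) (d : PySem.Dict Int (List Char)),
      (∀ v : Int, (∀ i : Nat, k ≤ i → i < k + rows.length → v ≠ (i : Int)) →
        (((rows.zipIdx k).map (fun p => ((p.2 : Int), p.1))).foldl
          (fun d p =>
            match PySem.List.pyGet? p.2 hor with
            | some c => if c ≠ ' ' then d.insert p.1 (d.getD p.1 [] ++ [c]) else d
            | none => d) d).get? v = d.get? v)
      ∧ (∀ i : Nat, k ≤ i → i < k + rows.length →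
          (((rows.zipIdx k).map (fun p => ((p.2 : Int), p.1))).foldl
            (fun d p =>
              match PySem.List.pyGet? p.2 hor with
              | some c => if c ≠ ' ' then d.insert p.1 (d.getD p.1 [] ++ [c]) else d
              | none => d) d).get? (i : Int) =
            match PySem.List.pyGet? (rows.getD (i - k) []) hor with
            | some c => if c ≠ ' ' then some (d.getD (i : Int) [] ++ [c]) else d.get? (i : Int)
            | none => d.get? (i : Int))
      ∧ (d.keys.Nodup →
          (((rows.zipIdx k).map (fun p => ((p.2 : Int), p.1))).foldl
            (fun d p =>
              match PySem.List.pyGet? p.2 hor with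
              | some c => if c ≠ ' ' then d.insert p.1 (d.getD p.1 [] ++ [c]) else d
              | none => d) d).keys.Nodup) := by
  induction rows with
  | nil =>
    intro k d
    refine ⟨fun v _ => rfl, fun i h1 h2 => ?_, fun h => h⟩
    simp only [List.length_nil, Nat.add_zero] at h2
    omega
  | cons r rows ih =>
    intro k d
    have hz : (((r :: rows).zipIdx k).map (fun p => ((p.2 : Int), p.1)))
        = ((k : Int), r) :: ((rows.zipIdx (k + 1)).map (fun p => ((p.2 : Int), p.1))) := by
      simp [List.zipIdx_cons]
    set d1 : PySem.Dict Int (List Char) :=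
      (match PySem.List.pyGet? r hor with
       | some c => if c ≠ ' ' then d.insert (k : Int) (d.getD (k : Int) [] ++ [c]) else d
       | none => d) with hd1
    have key1 : ∀ v : Int, v ≠ (k : Int) → d1.get? v = d.get? v := by
      intro v hv
      rw [hd1]
      cases PySem.List.pyGet? r hor with
      | none => rfl
      | some c =>
        by_cases hc : c = ' '
        · simp [hc]
        · simp only [hc, ne_eq, not_false_iff, if_pos]
          exact PySem.Dict.get?_insert_of_ne d _ hv
    have key2 : d1.get? (k : Int) = match PySem.List.pyGet? r hor with
        | some c => if c ≠ ' ' then some (d.getD (k : Int) [] ++ [c]) else d.get? (k : Int)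
        | none => d.get? (k : Int) := by
      rw [hd1]
      cases PySem.List.pyGet? r hor with
      | none => rfl
      | some c =>
        by_cases hc : c = ' '
        · simp [hc]
        · simp only [hc, ne_eq, not_false_iff, if_pos]
          exact PySem.Dict.get?_insert_self d _ _
    have key3 : d.keys.Nodup → d1.keys.Nodup := by
      intro h
      rw [hd1]
      cases PySem.List.pyGet? r hor with
      | none => exact h
      | some c =>
        by_cases hc : c = ' '
        · simpa [hc] using h
        · simp only [hc, ne_eq, not_false_iff, if_pos]
          exact PySem.Dict.nodup_keys_insert d _ _ h
    obtain ⟨ih1, ih2, ih3⟩ := ih (k + 1) d1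
    rw [hz]
    refine ⟨?_, ?_, ?_⟩
    · intro v hv
      rw [List.foldl_cons, ← hd1]
      rw [ih1 v (fun i hi1 hi2 => hv i (by omega) (by simp only [List.length_cons]; omega))]
      exact key1 v (hv k le_rfl (by simp only [List.length_cons]; omega))
    · intro i hi1 hi2
      rw [List.foldl_cons, ← hd1]
      by_cases hik : i = k
      · subst hik
        rw [ih1 (i : Int) (fun i' hi1' _ he => by
          have : i = i' := by exact_mod_cast he
          omega)]
        rw [key2, Nat.sub_self]
        rfl
      · have hki : k + 1 ≤ i := by omega
        have hi2' : i < (k + 1) + rows.length := by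
          simp only [List.length_cons] at hi2; omega
        rw [ih2 i hki hi2']
        have hvne : (i : Int) ≠ (k : Int) := by exact_mod_cast hik
        have hsub : i - k = (i - (k + 1)) + 1 := by omega
        have hrow : (r :: rows).getD (i - k) [] = rows.getD (i - (k + 1)) [] := by
          rw [hsub]; rfl
        rw [hrow]
        have e1 : d1.getD (i : Int) [] = d.getD (i : Int) [] := by
          unfold PySem.Dict.getD
          rw [key1 _ hvne]
        cases PySem.List.pyGet? (rows.getD (i - (k + 1)) []) hor with
        | none => exact key1 _ hvne
        | some c =>
          by_cases hc : c = ' '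
          · simp only [hc, ne_eq, not_true_eq_false, if_false]
            exact key1 _ hvne
          · simp only [hc, ne_eq, not_false_iff, if_pos, e1]
    · intro h
      rw [List.foldl_cons, ← hd1]
      exact ih3 (key3 h)

lemma pvLoop (L : List (List Char)) (n : Nat) (hne : L ≠ [])
    (hlen : ∀ l ∈ L, l.length = n) :
    ∀ j, j ≤ n → ∃ a, a ≤ j ∧
      pvRel L ((List.range j).foldl (fun st (k : Nat) => pvStepA L st (k : Int))
          ([], PySem.Dict.empty, []))
        ((List.range j).foldl (pvStepB L ((List.range n).map
            (fun (j : Nat) => L.all (fun line => decide (PySem.List.pyGet? line (j : Int) = some ' ')))))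
          ([], -1)) a j := by
  intro j
  induction j with
  | zero =>
    intro _
    unfold pvRel pvInvD
    simp only [List.range_zero, List.foldl_nil]
    refine ⟨0, le_rfl, trivial, by norm_num, ⟨?_, ?_, ?_⟩, ?_, le_rfl⟩
    · intro i
      simp [PySem.Dict.get?_empty, pvCell_empty]
    · intro v _
      exact PySem.Dict.get?_empty v
    · rw [PySem.Dict.keys_empty]
      exact List.nodup_nil
    · exact (pvCell_empty _ _).symm
  | succ j ihj =>
    intro hj1
    have hjn : j < n := hj1
    obtain ⟨a, haj, hrel⟩ := ihj (Nat.le_of_lt hjn)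
    unfold pvRel pvInvD at hrel
    obtain ⟨hout, hlast, ⟨hi1, hi2, hi3⟩, hop, haj2⟩ := hrel
    unfold pvRel pvInvD
    rw [List.range_succ, List.foldl_append, List.foldl_append, List.foldl_cons, List.foldl_cons,
        List.foldl_nil, List.foldl_nil]
    set stA := (List.range j).foldl (fun st (k : Nat) => pvStepA L st (k : Int))
        ([], PySem.Dict.empty, []) with hstAdef
    set stB := (List.range j).foldl (pvStepB L ((List.range n).map
        (fun (j : Nat) => L.all (fun line => decide (PySem.List.pyGet? line (j : Int) = some ' ')))))
        ([], -1) with hstBdef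
    have hguard : ((List.range n).map
          (fun (j : Nat) => L.all (fun line => decide (PySem.List.pyGet? line (j : Int) = some ' ')))).getD j false
        = L.all (fun line => decide (PySem.List.pyGet? line (j : Int) = some ' ')) :=
      PySem.List.getD_map_range _ n j false hjn
    by_cases hC : L.all (fun line => decide (PySem.List.pyGet? line (j : Int) = some ' ')) = true
    · -- separator column: both sides flush the group
      simp only [pvStepA, pvStepB, hguard, hC, if_true]
      have hsum : stB.2 + 1 = ((a : Nat) : Int) := by rw [hlast]; ring
      refine ⟨j + 1, le_rfl, ?_, ?_, ⟨?_, ?_, ?_⟩, ?_, le_rfl⟩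
      · rw [hout, hsum]
        simp only [pvCell_slice]
        have hv := pvEmitVals stA.2.1 L.dropLast a j ⟨hi1, hi2, hi3⟩
        rw [hv, hop]
      · push_cast; ring
      · intro i
        simp [PySem.Dict.get?_empty, pvCell_empty]
      · intro v _
        exact PySem.Dict.get?_empty v
      · rw [PySem.Dict.keys_empty]
        exact List.nodup_nil
      · exact (pvCell_empty _ _).symm
    · -- ordinary column: A extends the dict and op, B does nothing
      simp only [pvStepA, pvStepB, hguard, if_neg hC]
      rw [pvSlice_dropLast]
      simp only [pyEnumerate]
      have hRlen : ∀ i : Nat, i < L.dropLast.length → (L.dropLast.getD i []).length = n := by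
        intro i hi
        apply hlen
        exact (List.dropLast_sublist L).subset
          (by rw [List.getD_eq_getElem _ _ hi]; exact List.getElem_mem _)
      obtain ⟨f1, f2, f3⟩ := pvInnerFold ((j : Nat) : Int) L.dropLast 0 stA.2.1
      refine ⟨a, by omega, hout, hlast, ⟨?_, ?_, ?_⟩, ?_, by omega⟩
      · intro i
        by_cases hi : i < L.dropLast.length
        · rw [f2 i (Nat.zero_le i) (by omega)]
          rw [Nat.sub_zero]
          have hjr : j < (L.dropLast.getD i []).length := by rw [hRlen i hi]; omega
          have hget : PySem.List.pyGet? (L.dropLast.getD i []) ((j : Nat) : Int)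
              = some ((L.dropLast.getD i []).getD j ' ') := by
            rw [PySem.List.pyGet?_natCast, List.getElem?_eq_getElem hjr,
              List.getD_eq_getElem _ _ hjr]
          rw [hget]
          have hgetD : stA.2.1.getD (i : Int) [] = pvCell (L.dropLast.getD i []) a j := by
            unfold PySem.Dict.getD
            rw [hi1 i, if_pos hi]
            by_cases hc0 : pvCell (L.dropLast.getD i []) a j = []
            · rw [if_pos hc0, hc0]; rfl
            · rw [if_neg hc0]; rfl
          by_cases hcsp : (L.dropLast.getD i []).getD j ' ' = ' '
          · simp only [hcsp, ne_eq, not_true_eq_false, if_false]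
            rw [hi1 i, if_pos hi, if_pos hi]
            have : pvCell (L.dropLast.getD i []) a (j + 1)
                = pvCell (L.dropLast.getD i []) a j := by
              rw [pvCell_extend _ a j haj2 hjr, hcsp]
              simp
            rw [this]
          · simp only [ne_eq, hcsp, not_false_iff, if_pos]
            rw [hgetD, if_pos hi]
            have hext : pvCell (L.dropLast.getD i []) a (j + 1)
                = pvCell (L.dropLast.getD i []) a j
                  ++ [(L.dropLast.getD i []).getD j ' '] := by
              rw [pvCell_extend _ a j haj2 hjr, if_pos hcsp]
            rw [hext]
            rw [if_neg (by simp)]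
        · rw [f1 (i : Int) (fun i' _ hi2' he => by
            have : i = i' := by exact_mod_cast he
            omega)]
          rw [hi1 i, if_neg hi, if_neg hi]
      · intro v hv
        rw [f1 v (fun i' _ _ he => by
          rw [he] at hv
          exact absurd hv (by exact_mod_cast Nat.not_lt_zero i'))]
        exact hi2 v hv
      · exact f3 hi3
      · rw [pvGet_last L [] hne]
        have hzmem : L.getLastD [] ∈ L := pvGetLastD_mem L [] hne
        have hzlen : j < (L.getLastD []).length := by rw [hlen _ hzmem]; omega
        have hz : PySem.List.pyGet? (L.getLastD []) ((j : Nat) : Int)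
            = some ((L.getLastD []).getD j ' ') := by
          rw [PySem.List.pyGet?_natCast, List.getElem?_eq_getElem hzlen,
            List.getD_eq_getElem _ _ hzlen]
        rw [hz]
        by_cases hcsp : (L.getLastD []).getD j ' ' = ' '
        · simp only [hcsp, ne_eq, not_true_eq_false, if_false]
          rw [hop]
          rw [pvCell_extend _ a j haj2 hzlen, hcsp]
          simp
        · simp only [ne_eq, hcsp, not_false_iff, if_pos]
          rw [hop, pvCell_extend _ a j haj2 hzlen, if_pos hcsp]

lemma pvMain (L : List (List Char)) (n : Nat) (hne : L ≠ [])
    (hlen : ∀ l ∈ L, l.length = n) :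
    ((PySem.List.pyRange 0 (n : Int)).foldl (pvStepA L) ([], PySem.Dict.empty, [])).1
      = ((List.range n).foldl
          (pvStepB L ((List.range n).map
            (fun (j : Nat) => L.all (fun line => decide (PySem.List.pyGet? line (j : Int) = some ' ')))))
          ([], -1)).1 := by
  rw [PySem.List.pyRange_zero_natCast, List.foldl_map]
  obtain ⟨a, -, hrel⟩ := pvLoop L n hne hlen n le_rfl
  exact hrel.1

-- ===== VERDICT (by name: the statement is the Claim_ definition above) =====
theorem decolumnize_spec : Claim_equal_decolumnize := by
  intro s _ hpre
  unfold Pre_decolumnize at hpre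
  unfold Spec_decolumnize decolumnize decolumnize_alt
  obtain ⟨hne, -⟩ := hpre
  cases hmax : PySem.List.max?
      (((PySem.Chars.splitOn s.toList ['\n']).filter (fun l => !l.isEmpty)).map List.length) id with
  | none => simp [hmax]
  | some w =>
    simp only [hmax]
    have hLne : ((PySem.Chars.splitOn s.toList ['\n']).filter (fun l => !l.isEmpty)).map
        (fun l => pyLjust l (w + 1) ' ') ≠ [] := by
      simpa using hne
    have hlen : ∀ l ∈ ((PySem.Chars.splitOn s.toList ['\n']).filter (fun l => !l.isEmpty)).map
        (fun l => pyLjust l (w + 1) ' '), l.length = w + 1 := by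
      intro l hl
      obtain ⟨l0, hl0, rfl⟩ := List.mem_map.mp hl
      have hle : l0.length ≤ w := by
        have := PySem.List.max?_isMax hmax l0.length (List.mem_map_of_mem hl0)
        simpa using this
      simp [pyLjust]
      omega
    have hmain := pvMain (((PySem.Chars.splitOn s.toList ['\n']).filter (fun l => !l.isEmpty)).map
        (fun l => pyLjust l (w + 1) ' ')) (w + 1) hLne hlen
    have hcast : ((w : Int) + 1) = ((w + 1 : Nat) : Int) := by push_cast; ring
    rw [hcast]
    exact hmain
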